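-- pv_equiv track=rewrite | github.com/petchluvsyou/2110101-grader | 09_MoreDC_34.py | pattern3
-- ===== SOURCE A (Python) =====
-- def pattern3(N):
--     ans = []
--     c = 1
--     x = 0
--     for i in range(N):
--         ans.append([])
--         y = x
--         for j in range(N):
--             if y:
--                 ans[i].append(0)
--                 y-=1
--             else:
--                 ans[i].append(c)
--                 c+=1
--         x+=1
--     return ans
-- ===== SOURCE B (Python) =====
-- def pattern3(N):
--     res = []
--     for i in range(N):
--         start = 1 + i * N - i * (i - 1) // 2
--         res.append([0] * i + list(range(start, start + (N - i))))
--     return res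
-- ===== Notes on version B (the rewrite author's own statement) =====
-- stated objective: alternative
-- what changed: B drops A's running counter and inner element loop with its truthy-y branch: each row's first counter value is computed in closed form (start = 1 + i*N - i*(i-1)//2) and the row is built directly as [0]*i + list(range(start, start+N-i)).
import Mathlib
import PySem

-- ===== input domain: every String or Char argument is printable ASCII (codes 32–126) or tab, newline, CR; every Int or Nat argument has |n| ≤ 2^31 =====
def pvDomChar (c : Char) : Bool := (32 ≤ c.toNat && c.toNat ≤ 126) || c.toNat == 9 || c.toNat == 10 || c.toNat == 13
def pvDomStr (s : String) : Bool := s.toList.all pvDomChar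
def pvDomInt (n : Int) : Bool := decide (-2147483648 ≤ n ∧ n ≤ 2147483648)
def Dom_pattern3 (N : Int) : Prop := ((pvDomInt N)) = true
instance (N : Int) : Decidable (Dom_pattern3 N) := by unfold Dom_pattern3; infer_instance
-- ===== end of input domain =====

-- B replaces A's running counter and inner truthy-branch loop by a closed-form
-- per-row start value and direct row construction (objective: alternative).

-- ===== PORT A =====
-- inner loop body: state (row, y, c); 'if y:' append 0 and y-=1, else append c and c+=1
def pattern3Inner (t : List Int × Int × Int) (_j : Int) : List Int × Int × Int :=
  if t.2.1 ≠ 0 then (t.1 ++ [0], t.2.1 - 1, t.2.2)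
  else (t.1 ++ [t.2.2], t.2.1, t.2.2 + 1)

-- outer loop body: state (ans, c, x); run the inner loop then append the row, bump x
def pattern3Outer (N : Int) (st : List (List Int) × Int × Int) (_i : Int) :
    List (List Int) × Int × Int :=
  let inner := (PySem.List.pyRange 0 N 1).foldl pattern3Inner ([], st.2.2, st.2.1)
  (st.1 ++ [inner.1], inner.2.2, st.2.2 + 1)

def pattern3 (N : Int) : List (List Int) :=
  ((PySem.List.pyRange 0 N 1).foldl (pattern3Outer N) ([], 1, 0)).1

-- ===== PORT B =====
def pattern3_alt (N : Int) : List (List Int) :=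
  (PySem.List.pyRange 0 N 1).map (fun i =>
    let start := 1 + i * N - PySem.Int.floordiv (i * (i - 1)) 2
    List.replicate i.toNat 0 ++ PySem.List.pyRange start (start + (N - i)) 1)

-- ===== PRECONDITION & SPEC =====
def Spec_pattern3 (N : Int) (out : List (List Int)) : Prop := out = pattern3_alt N
instance (N : Int) (out : List (List Int)) : Decidable (Spec_pattern3 N out) := by unfold Spec_pattern3; infer_instance

-- ===== CLAIM (what is proved, stated in full; the proofs are below) =====
def Claim_equal_pattern3 : Prop := ∀ (N : Int), Dom_pattern3 N → Spec_pattern3 N (pattern3 N)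

-- ===== LEMMAS AND PROOFS =====

-- A's inner loop over any list only uses the list's length: starting from
-- (row, t, c) it appends min t len zeros then the counter values.
lemma inner_spec (L : List Int) : ∀ (row : List Int) (t : Nat) (c : Int),
    L.foldl pattern3Inner (row, (t : Int), c)
    = (row ++ List.replicate (min t L.length) 0
          ++ PySem.List.pyRange c (c + ((L.length - t : Nat) : Int)) 1,
       ((t - L.length : Nat) : Int),
       c + ((L.length - t : Nat) : Int)) := by
  induction L with
  | nil =>
      intro row t c
      simp
  | cons a L ih =>
      intro row t c
      cases t with
      | zero =>
          have hstep : pattern3Inner (row, ((0 : Nat) : Int), c) a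
              = (row ++ [c], ((0 : Nat) : Int), c + 1) := by
            simp [pattern3Inner]
          have hcons : PySem.List.pyRange c (c + ((L.length + 1 - 0 : Nat) : Int)) 1
              = c :: PySem.List.pyRange (c + 1) (c + ((L.length + 1 - 0 : Nat) : Int)) 1 :=
            PySem.List.pyRange_one_cons (by push_cast; omega)
          simp only [List.foldl_cons, hstep, ih (row ++ [c]) 0 (c + 1)]
          refine Prod.ext ?_ (Prod.ext (by simp) ?_)
          · simp only [List.length_cons, hcons]
            have harg : c + ((L.length + 1 - 0 : Nat) : Int)
                = c + 1 + ((L.length - 0 : Nat) : Int) := by push_cast; omega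
            rw [harg] at hcons
            simp [List.append_assoc]
            congr 1
            ring
          · show c + 1 + ((L.length - 0 : Nat) : Int)
                = c + ((L.length + 1 - 0 : Nat) : Int)
            push_cast; omega
      | succ s =>
          have hstep : pattern3Inner (row, ((s + 1 : Nat) : Int), c) a
              = (row ++ [0], ((s : Nat) : Int), c) := by
            simp [pattern3Inner]
            omega
          simp only [List.foldl_cons, hstep, ih (row ++ [0]) s c]
          refine Prod.ext ?_ (Prod.ext ?_ ?_)
          · have hm : min (s + 1) (L.length + 1) = min s L.length + 1 := by omega
            have hl : (L.length + 1 - (s + 1) : Nat) = (L.length - s : Nat) := by omega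
            simp [hm, hl, List.replicate_succ, List.append_assoc]
          · show ((s - L.length : Nat) : Int) = ((s + 1 - (L.length + 1) : Nat) : Int)
            congr 1; omega
          · show c + ((L.length - s : Nat) : Int)
                = c + ((L.length + 1 - (s + 1) : Nat) : Int)
            congr 2; omega

-- the closed-form start value of row a
def startN (N : Int) (a : Nat) : Int :=
  1 + (a : Int) * N - PySem.Int.floordiv ((a : Int) * ((a : Int) - 1)) 2

-- floor-division step: ((i+1)*i)//2 = (i*(i-1))//2 + i
lemma fd_step (i : Int) :
    PySem.Int.floordiv ((i + 1) * i) 2 = PySem.Int.floordiv (i * (i - 1)) 2 + i := by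
  obtain ⟨k, hk⟩ := Int.even_mul_succ_self (i - 1)
  have hk2 : i * (i - 1) = 2 * k := by
    rw [show i * (i - 1) = (i - 1) * (i - 1 + 1) by ring, hk]; ring
  have h2 : (i + 1) * i = 2 * (k + i) := by
    rw [show (i + 1) * i = i * (i - 1) + 2 * i by ring, hk2]; ring
  rw [hk2, h2, PySem.Int.floordiv_eq_ediv_of_pos (by norm_num),
      PySem.Int.floordiv_eq_ediv_of_pos (by norm_num),
      Int.mul_ediv_cancel_left _ (by norm_num), Int.mul_ediv_cancel_left _ (by norm_num)]


-- B's row-building function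
def rowB (N : Int) (i : Int) : List Int :=
  List.replicate i.toNat 0
    ++ PySem.List.pyRange (startN N i.toNat) (startN N i.toNat + (N - i)) 1

lemma rowB_eq (N i : Int) (h : 0 ≤ i) :
    (fun i => let start := 1 + i * N - PySem.Int.floordiv (i * (i - 1)) 2
              List.replicate i.toNat 0
                ++ PySem.List.pyRange start (start + (N - i)) 1) i = rowB N i := by
  simp only [rowB, startN, Int.toNat_of_nonneg h]

-- A's outer loop with counter at its closed-form value produces B's rows
lemma outer_spec (N : Int) (hN : 0 < N) (L : List Int) :
    ∀ (ans : List (List Int)) (a : Nat) (c : Int),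
    (a : Int) + L.length ≤ N → c = startN N a →
    (L.foldl (pattern3Outer N) (ans, c, (a : Int))).1
      = ans ++ (PySem.List.pyRange (a : Int) ((a : Int) + L.length) 1).map (rowB N) := by
  induction L with
  | nil =>
      intro ans a c _ _
      have h : (a : Int) + (([] : List Int).length : Int) = (a : Int) := by simp
      simp
  | cons z L ih =>
      intro ans a c hle hc
      have haN : (a : Int) < N := by
        have : ((z :: L).length : Int) = L.length + 1 := by simp
        omega
      have hlen : (PySem.List.pyRange 0 N 1).length = N.toNat := by
        simp [PySem.List.length_pyRange_one]
      have han : a ≤ N.toNat := by omega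
      have hrow : ((PySem.List.pyRange 0 N 1).foldl pattern3Inner ([], (a : Int), c))
          = (List.replicate a 0
               ++ PySem.List.pyRange c (c + ((N.toNat - a : Nat) : Int)) 1,
             ((a - N.toNat : Nat) : Int),
             c + ((N.toNat - a : Nat) : Int)) := by
        have := inner_spec (PySem.List.pyRange 0 N 1) [] a c
        rw [this, hlen]
        have hmin : min a N.toNat = a := by omega
        simp [hmin]
      have hNa : ((N.toNat - a : Nat) : Int) = N - a := by omega
      have hstart : c + ((N.toNat - a : Nat) : Int) = startN N (a + 1) := by
        rw [hNa, hc, startN, startN]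
        have : ((a + 1 : Nat) : Int) = (a : Int) + 1 := by push_cast; ring
        rw [this]
        have hfd := fd_step (a : Int)
        have h1 : (a : Int) + 1 - 1 = (a : Int) := by ring
        have hmul : ((a : Int) + 1) * N = (a : Int) * N + N := by ring
        rw [h1]
        omega
      have hstep : pattern3Outer N (ans, c, (a : Int)) z
          = (ans ++ [List.replicate a 0
               ++ PySem.List.pyRange c (c + ((N.toNat - a : Nat) : Int)) 1],
             c + ((N.toNat - a : Nat) : Int), (a : Int) + 1) := by
        simp only [pattern3Outer, hrow]
      have ha1 : ((a : Int) + 1) = ((a + 1 : Nat) : Int) := by push_cast; ring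
      have hle' : ((a + 1 : Nat) : Int) + (L.length : Int) ≤ N := by
        have : ((z :: L).length : Int) = L.length + 1 := by simp
        omega
      have hrowB : List.replicate a 0
            ++ PySem.List.pyRange c (c + ((N.toNat - a : Nat) : Int)) 1
          = rowB N (a : Int) := by
        rw [rowB, hNa, hc]
        simp [startN]
      have hcons : PySem.List.pyRange (a : Int) ((a : Int) + ((z :: L).length : Int)) 1
          = (a : Int) :: PySem.List.pyRange ((a : Int) + 1) ((a : Int) + ((z :: L).length : Int)) 1 := by
        refine PySem.List.pyRange_one_cons ?_
        have : ((z :: L).length : Int) = L.length + 1 := by simp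
        omega
      calc ((z :: L).foldl (pattern3Outer N) (ans, c, (a : Int))).1
          = (L.foldl (pattern3Outer N)
              (ans ++ [List.replicate a 0
                 ++ PySem.List.pyRange c (c + ((N.toNat - a : Nat) : Int)) 1],
               c + ((N.toNat - a : Nat) : Int), ((a + 1 : Nat) : Int))).1 := by
            rw [List.foldl_cons, hstep, ha1]
        _ = (ans ++ [rowB N (a : Int)])
              ++ (PySem.List.pyRange ((a + 1 : Nat) : Int)
                    (((a + 1 : Nat) : Int) + (L.length : Int)) 1).map (rowB N) := by
            rw [ih _ (a + 1) _ hle' hstart, hrowB]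
        _ = ans ++ (PySem.List.pyRange (a : Int) ((a : Int) + ((z :: L).length : Int)) 1).map (rowB N) := by
            rw [hcons, List.map_cons]
            have h1' : ((a + 1 : Nat) : Int) = (a : Int) + 1 := by push_cast; ring
            have h2' : ((a : Int) + 1) + (L.length : Int)
                = (a : Int) + ((z :: L).length : Int) := by
              push_cast [List.length_cons]; ring
            rw [h1', h2']
            simp [List.append_assoc]

lemma alt_eq_map_rowB (N : Int) :
    pattern3_alt N = (PySem.List.pyRange 0 N 1).map (rowB N) := by
  unfold pattern3_alt
  refine List.map_congr_left ?_
  intro i hi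
  have h0 : 0 ≤ i := (PySem.List.mem_pyRange_one.mp hi).1
  simpa using rowB_eq N i h0

-- ===== VERDICT (by name: the statement is the Claim_ definition above) =====
theorem pattern3_spec : Claim_equal_pattern3 := by
  intro N _
  show pattern3 N = pattern3_alt N
  rw [alt_eq_map_rowB]
  by_cases hN : 0 < N
  · have hlen : (((PySem.List.pyRange 0 N 1).length : Nat) : Int) = N := by
      rw [PySem.List.length_pyRange_one]; omega
    have hpre : ((0 : Nat) : Int) + ((PySem.List.pyRange 0 N 1).length : Int) ≤ N := by
      rw [hlen]; simp
    have hc : (1 : Int) = startN N 0 := by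
      unfold startN
      rw [PySem.Int.floordiv_eq_ediv_of_pos (by norm_num)]
      norm_num
    have h := outer_spec N hN (PySem.List.pyRange 0 N 1) [] 0 1 hpre hc
    simp only [Nat.cast_zero, zero_add, hlen] at h
    simpa [pattern3] using h
  · have : PySem.List.pyRange 0 N 1 = [] :=
      PySem.List.pyRange_one_eq_nil (by omega)
    simp [pattern3, this]
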